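-- pv_equiv track=rewrite | github.com/diegourbiaviles1/Calculadora | metodosNumericos.py | _separar_digitos_base10
-- ===== SOURCE A (Python) =====
-- from typing import Dict, Any, List, Tuple
--
-- def _separar_digitos_base10(num_str: str) -> Tuple[int, List[int]]:
--     """
--     Convierte el string en entero y devuelve sus dígitos en base 10.
--     """
--     s = num_str.strip().replace(" ", "")
--     if not s or not (s.lstrip("+-").isdigit()):
--         raise ValueError("Número inválido en base 10 (solo dígitos 0-9).")
--     signo = -1 if s.startswith("-") else 1
--     s_puro = s.lstrip("+-")
--     n = int(s_puro) * signo
--     digitos = [int(d) for d in s_puro]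
--     return n, digitos
-- ===== SOURCE B (Python) =====
-- def _separar_digitos_base10(num_str):
--     s = num_str.strip().replace(" ", "")
--     i = 0
--     while i < len(s) and s[i] in "+-":
--         i += 1
--     if i == len(s):
--         raise ValueError("Número inválido en base 10 (solo dígitos 0-9).")
--     n = 0
--     digitos = []
--     for c in s[i:]:
--         if not c.isdigit():
--             raise ValueError("Número inválido en base 10 (solo dígitos 0-9).")
--         d = int(c)
--         digitos.append(d)
--         n = n * 10 + d
--     return (-n if s[0] == "-" else n), digitos
-- ===== Notes on version B (the rewrite author's own statement) =====
-- stated objective: alternative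
-- what changed: B replaces A's library int(s_puro) parse and per-character comprehension by a single explicit left-to-right pass that validates each character with isdigit, collects its int value and Horner-accumulates the integer, applying the sign from s[0] at the end.
import Mathlib
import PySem

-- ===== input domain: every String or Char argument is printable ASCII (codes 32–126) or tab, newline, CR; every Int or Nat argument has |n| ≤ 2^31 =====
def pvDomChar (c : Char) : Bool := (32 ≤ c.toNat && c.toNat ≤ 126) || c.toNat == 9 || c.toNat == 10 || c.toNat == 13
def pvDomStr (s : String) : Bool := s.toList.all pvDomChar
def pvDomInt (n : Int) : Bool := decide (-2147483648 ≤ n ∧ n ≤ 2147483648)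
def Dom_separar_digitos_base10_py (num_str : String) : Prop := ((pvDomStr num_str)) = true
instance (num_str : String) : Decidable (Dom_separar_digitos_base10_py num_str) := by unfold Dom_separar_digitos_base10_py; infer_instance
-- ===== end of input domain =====

-- B replaces A's library int() parse by one explicit left-to-right pass that validates each character
-- with isdigit, collects its int value and Horner-accumulates the integer (objective: alternative;
-- same cost, return value identical on Pre_).

-- ===== PORT A =====
-- s.lstrip("+-") is ported by hand as dropWhile (c ∈ {'+','-'}): Python's str.lstrip(chars)
-- removes exactly the longest prefix of characters from the set — exact.
def separar_digitos_base10_py (num_str : String) : Int × List Int :=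
  -- s = num_str.strip().replace(" ", "")
  let s : List Char := PySem.Chars.replace (PySem.Chars.strip num_str.toList) [' '] []
  -- if not s or not (s.lstrip("+-").isdigit()): raise ValueError  -- excluded by Pre_; junk value
  if s.isEmpty || !(PySem.Chars.strIsdigit (s.dropWhile (fun c => c == '+' || c == '-'))) then (0, [])
  else
    let signo : Int := if PySem.Chars.startswith s ['-'] then -1 else 1
    let s_puro := s.dropWhile (fun c => c == '+' || c == '-')
    let n : Int := (PySem.Int.ofChars? s_puro).getD 0 * signo   -- int(s_puro): some on Pre_ inputs
    let digitos : List Int := s_puro.map (fun d => (PySem.Int.ofChars? [d]).getD 0)  -- [int(d) for d in s_puro]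
    (n, digitos)

-- ===== PORT B =====
-- the for-loop of Source B: validates each character with isdigit, appends int(c), Horner-accumulates n;
-- none = a raised ValueError (the explicit raise, or int(c) failing) — excluded by Pre_
def pvAltLoop (cs : List Char) (n : Int) (ds : List Int) : Option (Int × List Int) :=
  match cs with
  | [] => some (n, ds)
  | c :: rest =>
      if PySem.Chars.isdigit c then
        match PySem.Int.ofChars? [c] with   -- d = int(c)
        | some d => pvAltLoop rest (n * 10 + d) (ds ++ [d])
        | none => none
      else none

def separar_digitos_base10_py_alt (num_str : String) : Int × List Int :=
  let s : List Char := PySem.Chars.replace (PySem.Chars.strip num_str.toList) [' '] []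
  -- while i < len(s) and s[i] in "+-": i += 1;  rest = s[i:]
  let rest := s.dropWhile (fun c => c == '+' || c == '-')
  if rest.isEmpty then (0, [])  -- raise ValueError; excluded by Pre_
  else
    match pvAltLoop rest 0 [] with
    | none => (0, [])  -- raise ValueError; excluded by Pre_
    | some (n, ds) => ((if PySem.List.pyGet? s 0 = some '-' then -n else n), ds)

-- ===== PRECONDITION & SPEC =====
-- Pre_ = the inputs inside Dom on which A returns normally (no ValueError): after stripping
-- surrounding whitespace, deleting spaces and dropping leading sign characters, at least one
-- character remains and every remaining character is a decimal digit.  Over Dom's ASCII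
-- alphabet isdigit ⇔ '0'–'9', so within Dom this is exactly A's non-raising set; outside Dom
-- (e.g. Unicode digits) nothing is claimed, and B agrees with A there as well.
def Pre_separar_digitos_base10_py (num_str : String) : Prop :=
  ((PySem.Chars.replace (PySem.Chars.strip num_str.toList) [' '] []).dropWhile (fun c => c == '+' || c == '-')) ≠ [] ∧
  ((PySem.Chars.replace (PySem.Chars.strip num_str.toList) [' '] []).dropWhile (fun c => c == '+' || c == '-')).all
    (fun c => 48 ≤ c.toNat && c.toNat ≤ 57) = true
instance (num_str : String) : Decidable (Pre_separar_digitos_base10_py num_str) := by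
  unfold Pre_separar_digitos_base10_py; infer_instance
def pvWitness_separar_digitos_base10_py : String := " -42 "
def Spec_separar_digitos_base10_py (num_str : String) (out : Int × List Int) : Prop := out = separar_digitos_base10_py_alt num_str
instance (num_str : String) (out : Int × List Int) : Decidable (Spec_separar_digitos_base10_py num_str out) := by unfold Spec_separar_digitos_base10_py; infer_instance

-- ===== CLAIM (what is proved, stated in full; the proofs are below) =====
def Claim_equal_separar_digitos_base10_py : Prop := ∀ (num_str : String), Dom_separar_digitos_base10_py num_str → Pre_separar_digitos_base10_py num_str → Spec_separar_digitos_base10_py num_str (separar_digitos_base10_py num_str)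

-- ===== LEMMAS AND PROOFS =====
def pvDig (c : Char) : Nat := c.toNat - '0'.toNat

theorem pvChar_eq_of_toNat (c d : Char) (h : c.toNat = d.toNat) : c = d := by
  apply Char.ext; apply UInt32.toNat_inj.mp; exact h

theorem pvDigit_cases (c : Char) (h1 : '0' ≤ c) (h2 : c ≤ '9') :
    c = '0' ∨ c = '1' ∨ c = '2' ∨ c = '3' ∨ c = '4' ∨ c = '5' ∨ c = '6' ∨ c = '7' ∨ c = '8' ∨ c = '9' := by
  have l : 48 ≤ c.toNat := h1
  have u : c.toNat ≤ 57 := h2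
  have h : c.toNat = 48 ∨ c.toNat = 49 ∨ c.toNat = 50 ∨ c.toNat = 51 ∨ c.toNat = 52 ∨ c.toNat = 53 ∨
      c.toNat = 54 ∨ c.toNat = 55 ∨ c.toNat = 56 ∨ c.toNat = 57 := by omega
  rcases h with h|h|h|h|h|h|h|h|h|h
  · exact Or.inl (pvChar_eq_of_toNat _ '0' h)
  · exact Or.inr (Or.inl (pvChar_eq_of_toNat _ '1' h))
  · exact Or.inr (Or.inr (Or.inl (pvChar_eq_of_toNat _ '2' h)))
  · exact Or.inr (Or.inr (Or.inr (Or.inl (pvChar_eq_of_toNat _ '3' h))))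
  · exact Or.inr (Or.inr (Or.inr (Or.inr (Or.inl (pvChar_eq_of_toNat _ '4' h)))))
  · exact Or.inr (Or.inr (Or.inr (Or.inr (Or.inr (Or.inl (pvChar_eq_of_toNat _ '5' h))))))
  · exact Or.inr (Or.inr (Or.inr (Or.inr (Or.inr (Or.inr (Or.inl (pvChar_eq_of_toNat _ '6' h)))))))
  · exact Or.inr (Or.inr (Or.inr (Or.inr (Or.inr (Or.inr (Or.inr (Or.inl (pvChar_eq_of_toNat _ '7' h))))))))
  · exact Or.inr (Or.inr (Or.inr (Or.inr (Or.inr (Or.inr (Or.inr (Or.inr (Or.inl (pvChar_eq_of_toNat _ '8' h)))))))))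
  · exact Or.inr (Or.inr (Or.inr (Or.inr (Or.inr (Or.inr (Or.inr (Or.inr (Or.inr (pvChar_eq_of_toNat _ '9' h)))))))))

theorem pvIsIntSpace_of_digit (c : Char) (h1 : '0' ≤ c) (h2 : c ≤ '9') : PySem.Int.isIntSpace c = false := by
  have l : 48 ≤ c.toNat := h1
  have u : c.toNat ≤ 57 := h2
  simp only [PySem.Int.isIntSpace, Bool.or_eq_false_iff, decide_eq_false_iff_not]
  refine ⟨⟨⟨⟨⟨?_,?_⟩,?_⟩,?_⟩,?_⟩,?_⟩ <;> rintro rfl <;> simp_all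

theorem pvIsdigit_of_digit (c : Char) (h1 : '0' ≤ c) (h2 : c ≤ '9') : PySem.Chars.isdigit c = true := by
  rcases pvDigit_cases c h1 h2 with rfl|rfl|rfl|rfl|rfl|rfl|rfl|rfl|rfl|rfl <;> decide

theorem pvNospace (cs : List Char) (h : ∀ x ∈ cs, '0' ≤ x ∧ x ≤ '9') :
    (List.dropWhile PySem.Int.isIntSpace (List.dropWhile PySem.Int.isIntSpace cs).reverse).reverse = cs := by
  have key : ∀ ds : List Char, (∀ x ∈ ds, '0' ≤ x ∧ x ≤ '9') → List.dropWhile PySem.Int.isIntSpace ds = ds := by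
    intro ds hds
    rw [List.dropWhile_eq_self_iff]
    intro hh
    have := hds _ (List.getElem_mem hh)
    simp [pvIsIntSpace_of_digit _ this.1 this.2]
  rw [key cs h, key cs.reverse (by intro x hx; exact h x (by simpa using hx)), List.reverse_reverse]

-- the digitsVal?.go recurrence, captured over an abstract g (instantiated with the private
-- parser loop of PySem.Int.ofChars? by unification)
theorem pvGoCapture (g : List Char → Bool → Nat → Option Nat)
    (h1 : ∀ c cs b a, '0' ≤ c → c ≤ '9' → g (c :: cs) b a = g cs true (a * 10 + pvDig c))
    (h0 : ∀ a, g [] true a = some a) :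
    ∀ cs a, (∀ x ∈ cs, '0' ≤ x ∧ x ≤ '9') →
      g cs true a = some (cs.foldl (fun x c => x * 10 + pvDig c) a) := by
  intro cs
  induction cs with
  | nil => intro a _; simpa using h0 a
  | cons c cs ih =>
    intro a hx
    rw [h1 c cs true a (hx c (by simp)).1 (hx c (by simp)).2]
    rw [ih _ (fun x hxx => hx x (by simp [hxx]))]
    simp [List.foldl]

theorem pvDvCapture (dv : List Char → Option Nat) (cs : List Char) (v : Nat)
    (hv : dv cs = some v) :
    (Option.map (fun n : Int => n) (do let a ← dv cs; pure ((a : Nat) : Int))) = some ((v : Nat) : Int) := by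
  rw [hv]; rfl

-- int(s) on a nonempty all-digit string is the Horner value of its digits
theorem pvOfChars_digits (c : Char) (cs : List Char) (hc1 : '0' ≤ c) (hc2 : c ≤ '9')
    (h : ∀ x ∈ cs, '0' ≤ x ∧ x ≤ '9') :
    PySem.Int.ofChars? (c :: cs) =
      some ((List.foldl (fun x d => x * 10 + pvDig d) 0 (c :: cs) : Nat) : Int) := by
  have hall : ∀ x ∈ c :: cs, '0' ≤ x ∧ x ≤ '9' := by
    intro x hx
    rcases List.mem_cons.mp hx with rfl | hx
    · exact ⟨hc1, hc2⟩
    · exact h x hx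
  rcases pvDigit_cases c hc1 hc2 with rfl|rfl|rfl|rfl|rfl|rfl|rfl|rfl|rfl|rfl <;>
  · simp only [PySem.Int.ofChars?]
    rw [pvNospace _ hall]
    split
    next ds hq => exact absurd hq (by simp)
    next ds hq => exact absurd hq (by simp)
    next ds hq1 hq2 =>
      apply pvDvCapture
      conv_lhs => whnf
      refine pvGoCapture ?_ ?_ ?_ cs _ h
      · intro c cs b a hd1 hd2
        rcases pvDigit_cases c hd1 hd2 with rfl|rfl|rfl|rfl|rfl|rfl|rfl|rfl|rfl|rfl <;> rfl
      · intro a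
        rfl

theorem pvOfChars_single (c : Char) (hc1 : '0' ≤ c) (hc2 : c ≤ '9') :
    PySem.Int.ofChars? [c] = some ((c.toNat : Int) - 48) := by
  rw [pvOfChars_digits c [] hc1 hc2 (by simp)]
  have h48 : 48 ≤ c.toNat := hc1
  simp only [List.foldl, pvDig]
  congr 1
  have : '0'.toNat = 48 := rfl
  omega

-- the Nat-valued Horner fold of int() equals B's Int-valued Horner fold
theorem pvHorner_cast (cs : List Char) : ∀ (a : Nat), (∀ x ∈ cs, '0' ≤ x ∧ x ≤ '9') →
    ((cs.foldl (fun x c => x * 10 + pvDig c) a : Nat) : Int) =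
      cs.foldl (fun x c => x * 10 + ((c.toNat : Int) - 48)) (a : Int) := by
  induction cs with
  | nil => intro a _; simp
  | cons c cs ih =>
    intro a h
    have h48 : 48 ≤ c.toNat := (h c (by simp)).1
    simp only [List.foldl]
    rw [ih _ (fun x hx => h x (by simp [hx]))]
    congr 1
    simp only [pvDig]
    have : '0'.toNat = 48 := rfl
    push_cast
    omega

theorem pvAltLoop_spec (cs : List Char) : ∀ (n : Int) (ds : List Int),
    (∀ x ∈ cs, '0' ≤ x ∧ x ≤ '9') →
    pvAltLoop cs n ds = some (cs.foldl (fun x c => x * 10 + ((c.toNat : Int) - 48)) n,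
                              ds ++ cs.map (fun c => ((c.toNat : Int) - 48))) := by
  induction cs with
  | nil => intro n ds _; simp [pvAltLoop]
  | cons c cs ih =>
    intro n ds h
    have hc := h c (by simp)
    simp only [pvAltLoop, pvIsdigit_of_digit c hc.1 hc.2, if_true,
      pvOfChars_single c hc.1 hc.2]
    rw [ih _ _ (fun x hx => h x (by simp [hx]))]
    simp

-- singleton-prefix test: s.startswith("-") on a nonempty list reads its head
theorem pvStartswith_cons (c0 : Char) (s0 : List Char) :
    PySem.Chars.startswith (c0 :: s0) ['-'] = decide (c0 = '-') := by
  by_cases h : c0 = '-' <;> simp [PySem.Chars.startswith, List.isPrefixOf, h]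
  exact fun hh => h hh.symm

-- ===== VERDICT (by name: the statement is the Claim_ definition above) =====
theorem separar_digitos_base10_py_spec : Claim_equal_separar_digitos_base10_py := by
  intro num_str _ hpre
  unfold Spec_separar_digitos_base10_py
  obtain ⟨hne, hall⟩ := hpre
  simp only [separar_digitos_base10_py, separar_digitos_base10_py_alt]
  generalize hS : PySem.Chars.replace (PySem.Chars.strip num_str.toList) [' '] [] = s at hne hall ⊢
  have hdig : ∀ c ∈ s.dropWhile (fun c => c == '+' || c == '-'), '0' ≤ c ∧ c ≤ '9' := by
    intro x hx
    have hb := List.all_eq_true.mp hall x hx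
    simp only [Bool.and_eq_true, decide_eq_true_eq] at hb
    exact ⟨hb.1, hb.2⟩
  obtain ⟨c, cs, htc⟩ : ∃ c cs, s.dropWhile (fun c => c == '+' || c == '-') = c :: cs := by
    cases h0 : s.dropWhile (fun c => c == '+' || c == '-') with
    | nil => exact absurd h0 hne
    | cons c cs => exact ⟨c, cs, rfl⟩
  obtain ⟨c0, s0, hsc⟩ : ∃ c0 s0, s = c0 :: s0 := by
    cases h0 : s with
    | nil => rw [h0] at htc; simp at htc
    | cons c0 s0 => exact ⟨c0, s0, rfl⟩
  rw [htc] at hdig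
  rw [hsc] at htc ⊢
  rw [htc]
  have hct := hdig c (by simp)
  have hcs : ∀ x ∈ cs, '0' ≤ x ∧ x ≤ '9' := fun x hx => hdig x (by simp [hx])
  have hsd : PySem.Chars.strIsdigit (c :: cs) = true := by
    simp only [PySem.Chars.strIsdigit, Bool.and_eq_true, Bool.not_eq_true', List.all_eq_true]
    refine ⟨rfl, ?_⟩
    intro x hx
    have := hdig x hx
    exact pvIsdigit_of_digit x this.1 this.2
  rw [pvAltLoop_spec _ _ _ hdig, pvOfChars_digits c cs hct.1 hct.2 hcs]
  have hh := pvHorner_cast (c :: cs) 0 hdig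
  simp only [Nat.cast_zero] at hh
  have hmap : (c :: cs).map (fun d => (PySem.Int.ofChars? [d]).getD 0) =
      (c :: cs).map (fun x => ((x.toNat : Int) - 48)) := by
    apply List.map_congr_left
    intro x hx
    have hxd := hdig x hx
    rw [pvOfChars_single x hxd.1 hxd.2]
    rfl
  simp only [hsd, pvStartswith_cons, List.isEmpty_cons, Bool.not_true, Bool.or_false,
    Option.getD_some, hmap, hh, PySem.List.pyGet?_zero_cons, Bool.false_eq_true, if_false]
  by_cases hc0 : c0 = '-'
  · rw [if_pos (by simp [hc0]), if_pos (by simp [hc0])]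
    simp only [Prod.mk.injEq, List.nil_append]
    exact ⟨mul_neg_one _, trivial⟩
  · rw [if_neg (by simp [hc0]), if_neg (by simp [hc0])]
    simp only [Prod.mk.injEq, List.nil_append]
    exact ⟨mul_one _, trivial⟩
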